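-- pv_equiv track=rewrite | github.com/sameerthe8055/PythonDailyNotes-Skillbout | warmup.py | seq5
-- ===== SOURCE A (Python) =====
-- def seq5(n):
--     comp = 1
--     if n<0:
--         n = n * (-1)
--         comp =-1
--     while not(n < 11):
--         n=n//10
--     return n*comp
-- ===== SOURCE B (Python) =====
-- def seq5(n):
--     # Find the power of ten p at which the top of |n| drops below 11,
--     # then do a single division -- |n| itself is never mutated.
--     a = abs(n)
--     p = 1
--     while 11 * p <= a:
--         p *= 10
--     t = a // p
--     return -t if n < 0 else t
-- ===== Notes on version B (the rewrite author's own statement) =====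
-- stated objective: alternative
-- what changed: Instead of repeatedly replacing n by n//10 until it drops below 11, B keeps |n| fixed, grows a power-of-ten scale p until 11*p exceeds |n|, and performs a single division |n|//p at the end, with the sign applied by negation rather than a carried multiplier.
import Mathlib
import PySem

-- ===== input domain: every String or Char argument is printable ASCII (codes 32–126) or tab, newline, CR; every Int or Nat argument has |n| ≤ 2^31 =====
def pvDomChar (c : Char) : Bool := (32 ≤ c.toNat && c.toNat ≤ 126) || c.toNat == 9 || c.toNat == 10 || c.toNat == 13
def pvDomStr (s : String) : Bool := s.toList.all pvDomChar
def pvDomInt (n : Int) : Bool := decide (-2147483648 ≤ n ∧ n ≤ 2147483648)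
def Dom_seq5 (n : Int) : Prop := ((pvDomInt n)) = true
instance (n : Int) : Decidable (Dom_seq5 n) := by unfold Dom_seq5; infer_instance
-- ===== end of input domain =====

-- B replaces A's destructive `n //= 10` loop by growing a power-of-ten scale and one final
-- division (objective: alternative; same asymptotic cost).

-- ===== PORT A =====
-- the `while not (n < 11): n = n // 10` loop of A
def seq5Loop (n : Int) : Int :=
  if n < 11 then n else seq5Loop (PySem.Int.floordiv n 10)
termination_by n.toNat
decreasing_by
  simp only [PySem.Int.floordiv, Int.fdiv_eq_ediv]
  norm_num
  omega

def seq5 (n : Int) : Int :=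
  let comp : Int := if n < 0 then -1 else 1
  let m : Int := if n < 0 then n * (-1) else n
  seq5Loop m * comp

-- ===== PORT B =====
-- the `while 11 * p <= a: p *= 10` loop of B; the 0 < p argument only justifies termination
def seq5AltLoop (a : Int) (p : Int) (hp : 0 < p) : Int :=
  if 11 * p ≤ a then seq5AltLoop a (p * 10) (by omega) else p
termination_by (a - p).toNat
decreasing_by omega

def seq5_alt (n : Int) : Int :=
  let a : Int := |n|
  let p : Int := seq5AltLoop a 1 (by omega)
  let t : Int := PySem.Int.floordiv a p
  if n < 0 then -t else t

-- ===== PRECONDITION & SPEC =====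
def Spec_seq5 (n : Int) (out : Int) : Prop := out = seq5_alt n
instance (n : Int) (out : Int) : Decidable (Spec_seq5 n out) := by unfold Spec_seq5; infer_instance

-- ===== CLAIM (what is proved, stated in full; the proofs are below) =====
def Claim_equal_seq5 : Prop := ∀ (n : Int), Dom_seq5 n → Spec_seq5 n (seq5 n)

-- ===== LEMMAS AND PROOFS =====

theorem altLoop_pos (a : Int) : ∀ (k : Nat) (p : Int) (hp : 0 < p), (a - p).toNat = k →
    0 < seq5AltLoop a p hp := by
  intro k
  induction k using Nat.strong_induction_on with
  | _ k ih =>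
    intro p hp hk
    rw [seq5AltLoop]
    split_ifs with h
    · exact ih (a - p * 10).toNat (by omega) (p * 10) (by omega) rfl
    · exact hp

theorem altLoop_spec (a : Int) (ha : 0 ≤ a) : ∀ (k : Nat) (p : Int) (hp : 0 < p),
    (a - p).toNat = k → a / seq5AltLoop a p hp = seq5Loop (a / p) := by
  intro k
  induction k using Nat.strong_induction_on with
  | _ k ih =>
    intro p hp hk
    rw [seq5AltLoop]
    split_ifs with h
    · have h11 : ¬ (a / p < 11) := by
        rw [Int.ediv_lt_iff_lt_mul hp]; omega
      rw [ih (a - p * 10).toNat (by omega) (p * 10) (by omega) rfl]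
      conv_rhs => rw [seq5Loop.eq_def]
      simp only [h11, if_false]
      congr 1
      simp only [PySem.Int.floordiv, Int.fdiv_eq_ediv]
      rw [Int.ediv_ediv_of_nonneg (by omega : (0:Int) ≤ p)]
      simp
    · have h11 : a / p < 11 := by
        rw [Int.ediv_lt_iff_lt_mul hp]; omega
      rw [seq5Loop.eq_def]
      simp [h11]

-- ===== VERDICT (by name: the statement is the Claim_ definition above) =====
theorem seq5_spec : Claim_equal_seq5 := by
  intro n _
  unfold Spec_seq5 seq5 seq5_alt
  have ha : (0:Int) ≤ |n| := abs_nonneg n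
  have hq : 0 < seq5AltLoop |n| 1 (by omega) := altLoop_pos _ _ _ _ rfl
  have hmain : |n| / seq5AltLoop |n| 1 (by omega) = seq5Loop (|n| / 1) :=
    altLoop_spec _ ha _ _ _ rfl
  rw [Int.ediv_one] at hmain
  have hfd : PySem.Int.floordiv |n| (seq5AltLoop |n| 1 (by omega)) = seq5Loop |n| := by
    simp only [PySem.Int.floordiv, Int.fdiv_eq_ediv]
    rw [if_pos (Or.inl (le_of_lt hq))]
    simpa using hmain
  by_cases hn : n < 0
  · simp only [hn, if_true, hfd]
    have : |n| = n * (-1) := by rw [abs_of_neg hn]; ring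
    rw [← this]
    ring
  · simp only [hn, if_false, hfd]
    have : |n| = n := abs_of_nonneg (by omega)
    rw [this, mul_one]
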